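-- pv_equiv track=rewrite | github.com/pypi-data/pypi-mirror-278 | packages/kreeck/kreeck-0.1.0.5-py3-none-any.whl/kreeck/analyser.py | determine_badges
-- ===== SOURCE A (Python) =====
-- def determine_badges(contributions):
--     badges = {}
--     for author, lines in contributions.items():
--         if lines >= 1000:
--             badges[author] = 'Gold'
--         elif lines >= 500:
--             badges[author] = 'Silver'
--         elif lines >= 100:
--             badges[author] = 'Bronze'
--         else:
--             badges[author] = 'No Badge'
--     return badges
-- ===== SOURCE B (Python) =====
-- def determine_badges(contributions):
--     lines_of = dict(contributions)
--     badges = {author: 'No Badge' for author in lines_of}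
--     for threshold, label in ((100, 'Bronze'), (500, 'Silver'), (1000, 'Gold')):
--         for author, lines in lines_of.items():
--             if lines >= threshold:
--                 badges[author] = label
--     return badges
-- ===== Notes on version B (the rewrite author's own statement) =====
-- stated objective: alternative
-- what changed: Replaces the single pass with a per-author four-way if/elif cascade by staged tier passes: initialise every author to 'No Badge', then sweep once per tier in ascending order, monotonically overwriting the badge of every author meeting that tier's threshold (branch-free per tier).
import Mathlib
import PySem

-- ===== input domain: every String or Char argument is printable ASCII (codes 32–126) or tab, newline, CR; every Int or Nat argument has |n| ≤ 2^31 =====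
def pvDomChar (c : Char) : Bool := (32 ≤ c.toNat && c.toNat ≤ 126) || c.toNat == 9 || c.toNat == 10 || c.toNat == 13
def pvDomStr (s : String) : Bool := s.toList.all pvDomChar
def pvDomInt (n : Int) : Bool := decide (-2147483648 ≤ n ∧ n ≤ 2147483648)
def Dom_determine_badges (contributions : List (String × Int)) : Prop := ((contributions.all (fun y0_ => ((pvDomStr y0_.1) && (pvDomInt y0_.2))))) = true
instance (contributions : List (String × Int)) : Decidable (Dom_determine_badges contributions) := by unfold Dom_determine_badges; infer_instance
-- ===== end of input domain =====

-- B replaces A's single pass with a per-author if/elif cascade by staged tier passes ('No Badge' init, then one monotone overwrite sweep per tier); alternative decomposition, same O(n) cost.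


-- ===== PORT A =====
def determine_badges (contributions : List (String × Int)) : List (String × String) :=
  (contributions.foldl (fun badges p =>
      if p.2 ≥ 1000 then badges.insert p.1 "Gold"
      else if p.2 ≥ 500 then badges.insert p.1 "Silver"
      else if p.2 ≥ 100 then badges.insert p.1 "Bronze"
      else badges.insert p.1 "No Badge")
    PySem.Dict.empty).items

-- ===== PORT B =====
def determine_badges_alt (contributions : List (String × Int)) : List (String × String) :=
  let linesOf : PySem.Dict String Int :=
    contributions.foldl (fun d p => d.insert p.1 p.2) PySem.Dict.empty
  let badges0 : PySem.Dict String String :=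
    linesOf.keys.foldl (fun d a => d.insert a "No Badge") PySem.Dict.empty
  let badges :=
    [((100 : Int), "Bronze"), (500, "Silver"), (1000, "Gold")].foldl
      (fun b tl =>
        linesOf.items.foldl (fun b p => if p.2 ≥ tl.1 then b.insert p.1 tl.2 else b) b)
      badges0
  badges.items

-- ===== PRECONDITION & SPEC =====
def Spec_determine_badges (contributions : List (String × Int)) (out : List (String × String)) : Prop := out = determine_badges_alt contributions
instance (contributions : List (String × Int)) (out : List (String × String)) : Decidable (Spec_determine_badges contributions out) := by unfold Spec_determine_badges; infer_instance

-- ===== CLAIM (what is proved, stated in full; the proofs are below) =====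
def Claim_equal_determine_badges : Prop := ∀ (contributions : List (String × Int)), Dom_determine_badges contributions → Spec_determine_badges contributions (determine_badges contributions)

-- ===== LEMMAS AND PROOFS =====

-- A's cascade, as a value-level function
def pvLabel (n : Int) : String :=
  if n ≥ 1000 then "Gold" else if n ≥ 500 then "Silver"
  else if n ≥ 100 then "Bronze" else "No Badge"

lemma pv_stepA_eq :
    (fun (d : PySem.Dict String String) (p : String × Int) =>
        if p.2 ≥ 1000 then d.insert p.1 "Gold"
        else if p.2 ≥ 500 then d.insert p.1 "Silver"
        else if p.2 ≥ 100 then d.insert p.1 "Bronze"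
        else d.insert p.1 "No Badge") =
      (fun d p => d.insert p.1 (pvLabel p.2)) := by
  funext d p
  unfold pvLabel
  split_ifs <;> rfl

-- fold-insert with a mapped value tracks the raw fold-insert pointwise
lemma pv_get_fold_map (l : List (String × Int)) (k : String)
    (d : PySem.Dict String String) (e : PySem.Dict String Int)
    (h : d.get? k = (e.get? k).map pvLabel) :
    (l.foldl (fun d p => d.insert p.1 (pvLabel p.2)) d).get? k =
      ((l.foldl (fun e p => e.insert p.1 p.2) e).get? k).map pvLabel := by
  induction l generalizing d e with
  | nil => simpa using h
  | cons p t ih =>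
      simp only [List.foldl_cons]
      apply ih
      rw [PySem.Dict.get?_insert, PySem.Dict.get?_insert]
      split_ifs with hk
      · rfl
      · exact h

-- keys of a conditional-insert pass over existing keys are unchanged
lemma pv_keys_pass (t : Int) (lab : String) (l : List (String × Int))
    (b : PySem.Dict String String) (h : ∀ p ∈ l, p.1 ∈ b.keys) :
    (l.foldl (fun b p => if p.2 ≥ t then b.insert p.1 lab else b) b).keys = b.keys := by
  induction l generalizing b with
  | nil => rfl
  | cons p tl ih =>
      simp only [List.foldl_cons]
      by_cases hc : p.2 ≥ t
      · have hk : b.contains p.1 = true :=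
          (PySem.Dict.contains_iff_mem_keys b p.1).mpr (h p (by simp))
        have hkeys := PySem.Dict.keys_insert_of_contains b lab hk
        rw [if_pos hc, ih (b.insert p.1 lab) (fun q hq => by
          rw [hkeys]; exact h q (by simp [hq])), hkeys]
      · rw [if_neg hc]
        exact ih b (fun q hq => h q (by simp [hq]))

-- getD after one tier pass over (a, g a) pairs
lemma pv_getD_pass (t : Int) (lab : String) (g : String → Int)
    (ks : List String) (k : String) (b : PySem.Dict String String) :
    ((ks.map (fun a => (a, g a))).foldl
        (fun b p => if p.2 ≥ t then b.insert p.1 lab else b) b).getD k "" =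
      if k ∈ ks then (if g k ≥ t then lab else b.getD k "") else b.getD k "" := by
  induction ks generalizing b with
  | nil => simp
  | cons a tl ih =>
      simp only [List.map_cons, List.foldl_cons]
      rw [ih]
      by_cases hk : k ∈ tl
      · simp only [hk, if_true, List.mem_cons, or_true, if_true]
        by_cases hg : g k ≥ t
        · simp [hg]
        · simp only [hg, if_false]
          by_cases hga : g a ≥ t
          · rw [if_pos hga, PySem.Dict.getD_insert]
            by_cases hka : k = a
            · subst hka; exact absurd hga hg
            · rw [if_neg hka]
          · rw [if_neg hga]
      · by_cases hka : k = a
        · subst hka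
          simp only [hk, if_false, List.mem_cons, true_or, if_true]
          by_cases hg : g k ≥ t
          · simp [hg]
          · simp [hg]
        · have : ¬ k ∈ a :: tl := by simp [hka, hk]
          simp only [hk, if_false, this, if_false]
          by_cases hga : g a ≥ t
          · rw [if_pos hga, PySem.Dict.getD_insert, if_neg hka]
          · rw [if_neg hga]

-- getD after the 'No Badge' initialisation pass
lemma pv_getD_init (ks : List String) (k : String) (b : PySem.Dict String String) :
    (ks.foldl (fun d a => d.insert a "No Badge") b).getD k "" =
      if k ∈ ks then "No Badge" else b.getD k "" := by
  induction ks generalizing b with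
  | nil => simp
  | cons a tl ih =>
      simp only [List.foldl_cons]
      rw [ih]
      by_cases hk : k ∈ tl
      · simp [hk]
      · by_cases hka : k = a
        · subst hka; simp [hk]
        · have : ¬ k ∈ a :: tl := by simp [hka, hk]
          simp [hk, this, PySem.Dict.getD_insert, hka]

-- ===== VERDICT (by name: the statement is the Claim_ definition above) =====
theorem determine_badges_spec : Claim_equal_determine_badges := by
  intro l _
  unfold Spec_determine_badges determine_badges determine_badges_alt
  rw [pv_stepA_eq]
  -- the lines dict D and the two final dicts
  set D : PySem.Dict String Int :=
    l.foldl (fun d p => d.insert p.1 p.2) PySem.Dict.empty with hD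
  set A : PySem.Dict String String :=
    l.foldl (fun d p => d.insert p.1 (pvLabel p.2)) PySem.Dict.empty with hA
  have hndD : D.keys.Nodup := by
    rw [hD]
    exact PySem.Dict.nodup_keys_foldl_insert_key l Prod.fst (fun _ p => p.2)
      PySem.Dict.empty PySem.Dict.nodup_keys_empty
  have hndA : A.keys.Nodup := by
    rw [hA]
    exact PySem.Dict.nodup_keys_foldl_insert_key l Prod.fst (fun _ p => pvLabel p.2)
      PySem.Dict.empty PySem.Dict.nodup_keys_empty
  -- A and D have the same keys
  have hkeysA : A.keys = D.keys := by
    rw [hA, hD,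
      PySem.Dict.keys_foldl_insert_key l Prod.fst (fun _ p => pvLabel p.2) PySem.Dict.empty,
      PySem.Dict.keys_foldl_insert_key l Prod.fst (fun _ p => p.2) PySem.Dict.empty]
    rfl
  -- pointwise: A's entry is the label of D's entry
  have hget : ∀ k, A.get? k = (D.get? k).map pvLabel := by
    intro k
    rw [hA, hD]
    exact pv_get_fold_map l k PySem.Dict.empty PySem.Dict.empty (by
      rw [PySem.Dict.get?_empty, PySem.Dict.get?_empty]; rfl)
  -- unfold B's three tier passes
  simp only [List.foldl_cons, List.foldl_nil]
  set g : String → Int := fun a => D.getD a 0 with hg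
  have hitems : D.items = D.keys.map (fun a => (a, g a)) :=
    PySem.Dict.items_eq_map_keys D hndD 0
  -- the initialisation dict
  set B0 : PySem.Dict String String :=
    D.keys.foldl (fun d a => d.insert a "No Badge") PySem.Dict.empty with hB0
  have hkeysB0 : B0.keys = D.keys := by
    rw [hB0, PySem.Dict.keys_foldl_insert D.keys (fun _ _ => "No Badge") PySem.Dict.empty]
    rw [PySem.Dict.keys_empty, PySem.Set.update_nil_left]
    exact PySem.Set.ofList_eq_self_of_nodup D.keys hndD
  -- keys after each pass stay D.keys
  have hmem : ∀ (b : PySem.Dict String String), b.keys = D.keys →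
      ∀ p ∈ D.items, p.1 ∈ b.keys := by
    intro b hb p hp
    rw [hb]
    exact PySem.Dict.mem_keys_of_mem_items D hp
  set pass : Int → String → PySem.Dict String String → PySem.Dict String String :=
    fun t lab b =>
      D.items.foldl (fun b p => if p.2 ≥ t then b.insert p.1 lab else b) b with hpass
  have hkeys_pass : ∀ t lab b, b.keys = D.keys → (pass t lab b).keys = D.keys := by
    intro t lab b hb
    rw [hpass]
    rw [pv_keys_pass t lab D.items b (hmem b hb)]
    exact hb
  have hB1 := hkeys_pass 100 "Bronze" B0 hkeysB0
  have hB2 := hkeys_pass 500 "Silver" _ hB1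
  have hB3 := hkeys_pass 1000 "Gold" _ hB2
  -- getD through a pass
  have hgetD_pass : ∀ t lab (b : PySem.Dict String String) k,
      (pass t lab b).getD k "" =
        if k ∈ D.keys then (if g k ≥ t then lab else b.getD k "") else b.getD k "" := by
    intro t lab b k
    rw [hpass]
    simp only [hitems]
    exact pv_getD_pass t lab g D.keys k b
  -- final pointwise value on keys of D
  have hgetDB : ∀ k ∈ D.keys,
      (pass 1000 "Gold" (pass 500 "Silver" (pass 100 "Bronze" B0))).getD k "" =
        pvLabel (g k) := by
    intro k hk
    rw [hgetD_pass, hgetD_pass, hgetD_pass, hB0, pv_getD_init, if_pos hk, if_pos hk,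
      if_pos hk, if_pos hk]
    unfold pvLabel
    split_ifs <;> rfl
  -- same for A
  have hgetDA : ∀ k ∈ D.keys, A.getD k "" = pvLabel (g k) := by
    intro k hk
    have hk' : ¬ D.get? k = none := by
      rw [PySem.Dict.get?_eq_none_iff_not_mem_keys]; simp [hk]
    obtain ⟨v, hv⟩ := Option.ne_none_iff_exists'.mp hk'
    have : g k = v := by rw [hg]; exact PySem.Dict.getD_of_get?_eq_some D 0 hv
    rw [PySem.Dict.getD_eq_get?_getD, hget k, hv, this]
    rfl
  -- items equality via keys + getD
  have hfinal_keys :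
      (pass 1000 "Gold" (pass 500 "Silver" (pass 100 "Bronze" B0))).keys = D.keys := hB3
  rw [PySem.Dict.items_eq_map_keys A hndA "",
    PySem.Dict.items_eq_map_keys _ (by rw [hfinal_keys]; exact hndD) "",
    hkeysA, hfinal_keys]
  apply List.map_congr_left
  intro k hk
  rw [hgetDA k hk, hgetDB k hk]
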